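-- pv_equiv track=rewrite | github.com/matus-ruscak/AdventOfCode | utils.py | split_input_text_into_2_parts
-- ===== SOURCE A (Python) =====
-- def split_input_text_into_2_parts(input_text_file):
--     part_1 = []
--     part_2 = []
--     after_delimiter = False
--     for i in input_text_file:
--         if i == '':
--             after_delimiter = True
--         elif after_delimiter:
--             part_1.append(i)
--         else:
--             part_2.append(i)
--     return part_1, part_2
-- ===== SOURCE B (Python) =====
-- def split_input_text_into_2_parts(input_text_file):
--     lines = list(input_text_file)
--     try:
--         idx = lines.index('')
--     except ValueError:
--         return [], lines
--     return [x for x in lines[idx + 1:] if x != ''], lines[:idx]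
-- ===== Notes on version B (the rewrite author's own statement) =====
-- stated objective: idiomatic
-- what changed: Replaces A's single pass with a running after-delimiter flag by finding the first empty line with list.index and returning slices: the prefix before it and the non-empty suffix after it.
import Mathlib
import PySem

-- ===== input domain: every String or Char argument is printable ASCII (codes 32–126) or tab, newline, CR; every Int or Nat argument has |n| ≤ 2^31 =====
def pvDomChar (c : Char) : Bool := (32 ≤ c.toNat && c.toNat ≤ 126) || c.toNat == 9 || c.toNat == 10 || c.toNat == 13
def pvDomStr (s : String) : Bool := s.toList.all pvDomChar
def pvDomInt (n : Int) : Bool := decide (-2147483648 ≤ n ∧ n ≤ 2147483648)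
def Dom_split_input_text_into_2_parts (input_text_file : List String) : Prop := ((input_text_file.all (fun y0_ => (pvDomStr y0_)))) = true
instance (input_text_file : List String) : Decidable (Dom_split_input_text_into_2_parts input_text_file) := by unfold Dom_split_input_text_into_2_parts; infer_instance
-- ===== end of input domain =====

-- B replaces A's flag-carrying single pass by locating the first empty line with
-- list.index and returning slices around it (idiomatic decomposition; same cost).


-- ===== PORT A =====
-- literal transliteration: fold over the lines carrying (part_1, part_2, after_delimiter)
def split_input_text_into_2_parts (input_text_file : List String) : List String × List String :=
  let st := input_text_file.foldl
    (fun (st : List String × List String × Bool) i =>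
      if i == "" then (st.1, st.2.1, true)
      else if st.2.2 then (st.1 ++ [i], st.2.1, st.2.2)
      else (st.1, st.2.1 ++ [i], st.2.2))
    ([], [], false)
  (st.1, st.2.1)

-- ===== PORT B =====
-- literal transliteration of Source B: first index of "", then slices
def split_input_text_into_2_parts_alt (input_text_file : List String) : List String × List String :=
  match PySem.List.index? input_text_file "" with
  | none => ([], input_text_file)
  | some idx =>
      ((PySem.List.slice input_text_file (some ((idx : Int) + 1)) none).filter (fun x => x ≠ ""),
       PySem.List.slice input_text_file none (some (idx : Int)))

-- ===== PRECONDITION & SPEC =====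
def Spec_split_input_text_into_2_parts (input_text_file : List String) (out : List String × List String) : Prop := out = split_input_text_into_2_parts_alt input_text_file
instance (input_text_file : List String) (out : List String × List String) : Decidable (Spec_split_input_text_into_2_parts input_text_file out) := by unfold Spec_split_input_text_into_2_parts; infer_instance

-- ===== CLAIM (what is proved, stated in full; the proofs are below) =====
def Claim_equal_split_input_text_into_2_parts : Prop := ∀ (input_text_file : List String), Dom_split_input_text_into_2_parts input_text_file → Spec_split_input_text_into_2_parts input_text_file (split_input_text_into_2_parts input_text_file)

-- ===== LEMMAS AND PROOFS =====

def pvStepA (st : List String × List String × Bool) (i : String) : List String × List String × Bool :=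
  if i == "" then (st.1, st.2.1, true)
  else if st.2.2 then (st.1 ++ [i], st.2.1, st.2.2)
  else (st.1, st.2.1 ++ [i], st.2.2)

theorem pvA_eq_fold (l : List String) :
    split_input_text_into_2_parts l =
      ((l.foldl pvStepA ([], [], false)).1, (l.foldl pvStepA ([], [], false)).2.1) := rfl

-- B's slices, rewritten in drop/take form
theorem pvAlt_eq (l : List String) :
    split_input_text_into_2_parts_alt l =
      (match PySem.List.index? l "" with
       | none => ([], l)
       | some k => ((l.drop (k + 1)).filter (fun x => x ≠ ""), l.take k)) := by
  unfold split_input_text_into_2_parts_alt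
  cases h : PySem.List.index? l "" with
  | none => rfl
  | some k =>
      dsimp only
      rw [show ((k : Nat) : Int) + 1 = ((k + 1 : Nat) : Int) by push_cast; ring,
        PySem.List.slice_from_natCast, PySem.List.slice_to_natCast]

-- after the delimiter: the fold with flag true appends exactly the non-empty lines to part_1
theorem pvFold_true (l : List String) (p1 p2 : List String) :
    l.foldl pvStepA (p1, p2, true) = (p1 ++ l.filter (fun x => x ≠ ""), p2, true) := by
  induction l generalizing p1 with
  | nil => simp
  | cons x xs ih =>
      by_cases hx : x = ""
      · subst hx; simp [pvStepA, List.foldl_cons, ih]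
      · simp [pvStepA, List.foldl_cons, hx, ih]

-- before the delimiter: p2 is a pure accumulator of the fold with flag false
theorem pvFold_false (l : List String) (p2 : List String) :
    l.foldl pvStepA ([], p2, false) =
      ((l.foldl pvStepA ([], [], false)).1,
       p2 ++ (l.foldl pvStepA ([], [], false)).2.1,
       (l.foldl pvStepA ([], [], false)).2.2) := by
  induction l generalizing p2 with
  | nil => simp
  | cons x xs ih =>
      by_cases hx : x = ""
      · subst hx
        simp only [pvStepA, List.foldl_cons, beq_self_eq_true, if_true]
        rw [pvFold_true, pvFold_true]; simp
      · simp only [List.foldl_cons, pvStepA, if_neg (by simp [hx] : ¬ ((x == "") = true)),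
          Bool.false_eq_true, if_neg (by simp : ¬ (False : Prop))]
        simp only [List.nil_append]
        rw [ih (p2 ++ [x]), ih ([x])]
        simp
      
theorem split_input_text_into_2_parts_main (l : List String) :
    split_input_text_into_2_parts l = split_input_text_into_2_parts_alt l := by
  induction l with
  | nil => rfl
  | cons x xs ih =>
      rw [pvAlt_eq]
      by_cases hx : x = ""
      · subst hx
        rw [pvA_eq_fold]
        simp only [List.foldl_cons, pvStepA, beq_self_eq_true, if_true]
        rw [pvFold_true, PySem.List.index?_cons_self]
        simp
      · rw [pvA_eq_fold]
        simp only [List.foldl_cons, pvStepA, if_neg (by simp [hx] : ¬ ((x == "") = true)),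
          Bool.false_eq_true, if_neg (by simp : ¬ (False : Prop))]
        rw [pvFold_false]
        rw [pvAlt_eq] at ih
        rw [pvA_eq_fold] at ih
        dsimp only [List.nil_append]
        rw [PySem.List.index?_cons_of_ne _ (by simpa using hx)]
        cases hidx : PySem.List.index? xs "" with
        | none =>
            rw [hidx] at ih
            simp only [Option.map_none]
            have h1 := congrArg Prod.fst ih
            have h2 := congrArg Prod.snd ih
            simp only at h1 h2
            simp [h1, h2]
        | some k =>
            rw [hidx] at ih
            simp only [Option.map_some]
            have h1 := congrArg Prod.fst ih
            have h2 := congrArg Prod.snd ih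
            simp only at h1 h2
            simp [h1, h2, List.drop_succ_cons, List.take_succ_cons]

-- ===== VERDICT (by name: the statement is the Claim_ definition above) =====
theorem split_input_text_into_2_parts_spec : Claim_equal_split_input_text_into_2_parts := by
  intro l _
  exact split_input_text_into_2_parts_main l
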